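-- pv_equiv track=rewrite | github.com/GeorgeGantus/GoogleKickStart | 2018/A/EvenDigits.py | getLower
-- ===== SOURCE A (Python) =====
-- def getLower(n):
--     num = 0
--     odd_flag = False
--     for c in n:
--         num = num * 10
--         if odd_flag:
--             num += 8
--             continue
--
--         if int(c) % 2 != 0:
--             num += int(c)-1
--             odd_flag = True
--         else:
--             num += int(c)
--     return num
-- ===== SOURCE B (Python) =====
-- def getLower(n):
--     total = 0
--     w = 10 ** len(n)
--     for c in n:
--         w //= 10
--         d = int(c)
--         if d % 2:
--             return total + (d - 1) * w + 8 * (w - 1) // 9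
--         total += d * w
--     return total
-- ===== Notes on version B (the rewrite author's own statement) =====
-- stated objective: alternative
-- what changed: Replaces A's single accumulator-with-odd-flag scan (which keeps looping to append 8s digit by digit) with a positional-weight scan that returns early at the first odd digit using the closed form 8*(w-1)//9 for the trailing 8-run.
import Mathlib
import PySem

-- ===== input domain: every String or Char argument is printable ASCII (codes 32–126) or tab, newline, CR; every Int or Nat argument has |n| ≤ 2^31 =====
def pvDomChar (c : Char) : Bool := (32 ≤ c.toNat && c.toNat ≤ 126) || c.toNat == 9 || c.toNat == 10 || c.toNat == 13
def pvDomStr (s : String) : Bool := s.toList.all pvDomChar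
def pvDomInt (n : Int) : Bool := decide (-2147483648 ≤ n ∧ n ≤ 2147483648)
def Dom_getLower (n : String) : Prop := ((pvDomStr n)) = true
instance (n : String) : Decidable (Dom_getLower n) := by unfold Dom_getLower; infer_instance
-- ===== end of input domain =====

-- B replaces A's accumulator-with-odd-flag scan by a positional-weight scan that
-- returns early at the first odd digit with a closed-form 8-run (alternative decomposition).


-- int(c) for a single character: total form of PySem.Int.ofChars? [c];
-- exact on digit characters, which Pre_getLower guarantees (elsewhere Python raises ValueError).
def pyIntChar (c : Char) : Int := (PySem.Int.ofChars? [c]).getD 0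

-- ===== PORT A =====
-- the 'for c in n' loop of A, state = (num, odd_flag)
def getLowerLoopA : List Char → Int → Bool → Int
  | [], num, _ => num
  | c :: rest, num, oddFlag =>
    let num := num * 10
    if oddFlag then getLowerLoopA rest (num + 8) true
    else if PySem.Int.mod (pyIntChar c) 2 ≠ 0 then
      getLowerLoopA rest (num + pyIntChar c - 1) true
    else getLowerLoopA rest (num + pyIntChar c) false

def getLower (n : String) : Int := getLowerLoopA n.toList 0 false

-- ===== PORT B =====
-- the 'for c in n' loop of B, state = (total, w); early 'return' at the first odd digit
def getLowerLoopB : List Char → Int → Int → Int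
  | [], total, _ => total
  | c :: rest, total, w =>
    let w := PySem.Int.floordiv w 10
    let d := pyIntChar c
    if PySem.Int.mod d 2 ≠ 0 then total + (d - 1) * w + PySem.Int.floordiv (8 * (w - 1)) 9
    else getLowerLoopB rest (total + d * w) w

def getLower_alt (n : String) : Int := getLowerLoopB n.toList 0 ((10 : Int) ^ n.toList.length)

-- ===== PRECONDITION & SPEC =====
def pvEvenDigit (c : Char) : Bool := c ∈ ['0','2','4','6','8']
def pvOddDigit (c : Char) : Bool := c ∈ ['1','3','5','7','9']
-- Pre_ excludes exactly the strings on which Python A raises ValueError at int(c):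
-- those whose longest even-digit prefix is followed by a non-digit character; chars
-- after the first odd digit are never read by A, which skips the int(c) call once odd_flag is set.
def Pre_getLower (n : String) : Prop :=
  (match n.toList.dropWhile pvEvenDigit with
   | [] => true
   | c :: _ => pvOddDigit c) = true
instance (n : String) : Decidable (Pre_getLower n) := by unfold Pre_getLower; infer_instance

def pvWitness_getLower : String := "1234"

def Spec_getLower (n : String) (out : Int) : Prop := out = getLower_alt n
instance (n : String) (out : Int) : Decidable (Spec_getLower n out) := by unfold Spec_getLower; infer_instance

-- ===== CLAIM (what is proved, stated in full; the proofs are below) =====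
def Claim_equal_getLower : Prop := ∀ (n : String), Dom_getLower n → Pre_getLower n → Spec_getLower n (getLower n)

-- ===== LEMMAS AND PROOFS =====

-- repunit: rep k = (10^k - 1) / 9, the k-digit 1-run
def rep : Nat → Int
  | 0 => 0
  | k + 1 => 10 * rep k + 1

theorem nine_mul_rep (k : Nat) : 9 * rep k = 10 ^ k - 1 := by
  induction k with
  | zero => simp [rep]
  | succ k ih => simp only [rep, pow_succ]; omega

theorem floordiv_ten_pow (k : Nat) :
    PySem.Int.floordiv ((10 : Int) ^ (k + 1)) 10 = 10 ^ k := by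
  rw [PySem.Int.floordiv_eq_iff_of_pos (by omega)]
  constructor
  · rw [pow_succ]
  · rw [pow_succ]; nlinarith [pow_pos (show (0:Int) < 10 by omega) k]

theorem floordiv_eights (k : Nat) :
    PySem.Int.floordiv (8 * ((10 : Int) ^ k - 1)) 9 = 8 * rep k := by
  rw [PySem.Int.floordiv_eq_iff_of_pos (by omega)]
  have h := nine_mul_rep k
  omega

-- A's loop once the odd flag is set: k steps of num ↦ num*10 + 8
theorem loopA_odd (cs : List Char) : ∀ num : Int,
    getLowerLoopA cs num true = num * 10 ^ cs.length + 8 * rep cs.length := by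
  induction cs with
  | nil => intro num; simp [getLowerLoopA, rep]
  | cons c rest ih =>
    intro num
    simp only [getLowerLoopA, if_pos, ih, List.length_cons, rep]
    have h9 := nine_mul_rep rest.length
    ring_nf
    linarith

-- loop correspondence: B's (total, w) state tracks A's accumulator as total = num * w
theorem loop_correspond (cs : List Char) : ∀ num : Int,
    getLowerLoopA cs num false =
      getLowerLoopB cs (num * 10 ^ cs.length) ((10 : Int) ^ cs.length) := by
  induction cs with
  | nil => intro num; simp [getLowerLoopA, getLowerLoopB]
  | cons c rest ih =>
    intro num
    simp only [getLowerLoopA, getLowerLoopB, List.length_cons, Bool.false_eq_true, if_false,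
      floordiv_ten_pow]
    by_cases h : PySem.Int.mod (pyIntChar c) 2 ≠ 0
    · simp only [if_pos h, loopA_odd, floordiv_eights]
      ring
    · simp only [if_neg h, ih]
      ring_nf

-- ===== VERDICT (by name: the statement is the Claim_ definition above) =====
theorem getLower_spec : Claim_equal_getLower := by
  intro n _ _
  show getLower n = getLower_alt n
  have h := loop_correspond n.toList 0
  simpa [getLower, getLower_alt] using h
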